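-- pv_equiv track=rewrite | github.com/UADE-Progra-I/repooficial-AlvesMeloMatheus | Practicando_para_parcial.py | sumando_valor_porFila
-- ===== SOURCE A (Python) =====
-- def sumando_valor_porFila (matriz):
--     nuevaMatriz = []
--     suma = 0
--     for fila in matriz:
--         for elemento in fila:
--             suma = suma + elemento
--         nuevaMatriz.append(suma)  # sumo por fila pues el appende va dentro del bulce de filas
--     return nuevaMatriz
-- ===== SOURCE B (Python) =====
-- def sumando_valor_porFila(matriz):
--     # two passes: per-row sums, then prefix-scan
--     sumas = [sum(fila) for fila in matriz]
--     resultado = []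
--     total = 0
--     for s in sumas:
--         total += s
--         resultado.append(total)
--     return resultado
-- ===== Notes on version B (the rewrite author's own statement) =====
-- stated objective: idiomatic
-- what changed: Replaced the single element-level accumulator nested loop by two shaped passes: map sum over rows, then a prefix-sum scan over the row sums.
import Mathlib
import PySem

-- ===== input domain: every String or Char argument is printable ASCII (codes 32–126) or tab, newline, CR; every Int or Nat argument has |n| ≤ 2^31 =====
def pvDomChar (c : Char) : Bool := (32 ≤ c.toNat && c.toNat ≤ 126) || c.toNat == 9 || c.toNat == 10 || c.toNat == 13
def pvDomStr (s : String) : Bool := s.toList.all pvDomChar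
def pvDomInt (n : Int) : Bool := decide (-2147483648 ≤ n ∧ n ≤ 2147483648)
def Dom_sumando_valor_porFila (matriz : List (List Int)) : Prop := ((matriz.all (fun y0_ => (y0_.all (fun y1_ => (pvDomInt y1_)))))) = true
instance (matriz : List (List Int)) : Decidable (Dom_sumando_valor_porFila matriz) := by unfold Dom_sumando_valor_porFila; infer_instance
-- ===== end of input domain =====

-- B replaces A's element-level running accumulator with two passes: per-row sums, then a prefix-sum scan (idiomatic decomposition, same cost).

-- ===== PORT A =====
-- inner loop: suma = suma + elemento over fila
def pvA_inner (suma : Int) (fila : List Int) : Int :=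
  fila.foldl (fun s e => s + e) suma

-- outer loop state: (nuevaMatriz, suma)
def sumando_valor_porFila (matriz : List (List Int)) : List Int :=
  (matriz.foldl (fun (st : List Int × Int) fila =>
      let suma := pvA_inner st.2 fila
      (st.1 ++ [suma], suma)) ([], 0)).1

-- ===== PORT B =====
def pvB_scan (total : Int) (sumas : List Int) : List Int :=
  match sumas with
  | [] => []
  | s :: rest => (total + s) :: pvB_scan (total + s) rest

def sumando_valor_porFila_alt (matriz : List (List Int)) : List Int :=
  pvB_scan 0 (matriz.map (fun fila => fila.foldl (· + ·) 0))

-- ===== PRECONDITION & SPEC =====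
def Spec_sumando_valor_porFila (matriz : List (List Int)) (out : List Int) : Prop := out = sumando_valor_porFila_alt matriz
instance (matriz : List (List Int)) (out : List Int) : Decidable (Spec_sumando_valor_porFila matriz out) := by unfold Spec_sumando_valor_porFila; infer_instance

-- ===== CLAIM (what is proved, stated in full; the proofs are below) =====
def Claim_equal_sumando_valor_porFila : Prop := ∀ (matriz : List (List Int)), Dom_sumando_valor_porFila matriz → Spec_sumando_valor_porFila matriz (sumando_valor_porFila matriz)

-- ===== LEMMAS AND PROOFS =====
lemma pvA_inner_eq (suma : Int) (fila : List Int) :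
    pvA_inner suma fila = suma + fila.foldl (· + ·) 0 := by
  induction fila generalizing suma with
  | nil => simp [pvA_inner]
  | cons x xs ih =>
    simp only [pvA_inner, List.foldl_cons] at *
    rw [ih (suma + x), ih (0 + x)]
    ring_nf

lemma pvA_loop_eq (matriz : List (List Int)) (acc : List Int) (suma : Int) :
    (matriz.foldl (fun (st : List Int × Int) fila =>
      let s := pvA_inner st.2 fila
      (st.1 ++ [s], s)) (acc, suma)).1
    = acc ++ pvB_scan suma (matriz.map (fun fila => fila.foldl (· + ·) 0)) := by
  induction matriz generalizing acc suma with
  | nil => simp [pvB_scan]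
  | cons f rest ih =>
    simp only [List.foldl_cons, List.map_cons, pvB_scan]
    rw [pvA_inner_eq, ih]
    simp

-- ===== VERDICT (by name: the statement is the Claim_ definition above) =====
theorem sumando_valor_porFila_spec : Claim_equal_sumando_valor_porFila := by
  intro m _
  unfold Spec_sumando_valor_porFila sumando_valor_porFila sumando_valor_porFila_alt
  simpa using pvA_loop_eq m [] 0
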